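-- pv_equiv track=rewrite | github.com/RakhimovSE/Python-Lessons | 5. October 2018/33. 2018_10_28/source_1.py | func
-- ===== SOURCE A (Python) =====
-- def amount(p, digit_count):
--     """
--     Вычисляет кол-во i-значных чисел в n-ичной системе счисления
--     :param p: Система счисления
--     :param digit_count: Кол-во знаков числа
--     :return:
--     """
--     return (p - 1) * p ** (digit_count - 1)
--
-- def to_base(n, base):
--     convert_string = "0123456789ABCDEF"
--     if n < base:
--         return convert_string[n]
--     else:
--         return to_base(n // base, base) + convert_string[n % base]
--
-- def func(p, n):
--     digit_count = 1
--     digit_sum = 0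
--     while True:
--         cur_count = amount(p, digit_count) * digit_count
--         if digit_sum + cur_count >= n:
--             break
--         digit_sum += cur_count
--         digit_count += 1
--     nums_before = (n - digit_sum - 1) // digit_count
--     first_num10 = int('1' + '0' * (digit_count - 1), p)
--     num_search = to_base(first_num10 + nums_before, p)
--     digit_index = n - digit_sum - nums_before * digit_count - 1
--     return num_search[digit_index]
-- ===== SOURCE B (Python) =====
-- def func(p, n):
--     digits = "0123456789ABCDEF"
--     k = 1          # current block: numbers with k digits in base p
--     start = 1      # first k-digit number, p**(k-1)
--     rem = n        # 1-based position inside the remaining stream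
--     while rem > start * (p - 1) * k:
--         rem -= start * (p - 1) * k
--         k += 1
--         start *= p
--     q, r = divmod(rem - 1, k)
--     num = start + q                    # the number containing the digit
--     shift = k - 1 - r                  # digit r (from the left) of num
--     return digits[(num // p ** shift) % p]
-- ===== Notes on version B (the rewrite author's own statement) =====
-- stated objective: alternative
-- what changed: B replaces A's closed-form index arithmetic (amount()*k block sums, int('1'+'0'*(k-1), p) re-parse, recursive to_base string construction and string indexing) by a single block walk maintaining (k, start=p^(k-1), remaining position) and extracts the requested digit purely arithmetically as (num // p**(k-1-r)) % p, never building the number's digit string.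
-- intended difference: For -16 <= n <= -1 (positions before the stream starts) A returns a digit picked by Python's negative-string-index wraparound ('F' at (10,-1)); B returns what its arithmetic yields there ('9' at (10,-1)); no such position exists, and B's value is not an indexing accident. — e.g. on func(10, -1): A returns "F", B returns "9"
-- outside the precondition, e.g. on func(20, 5): A returns '5', B returns '5'; on func(0, -1): A returns 'F', B raises ZeroDivisionError
import Mathlib
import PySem

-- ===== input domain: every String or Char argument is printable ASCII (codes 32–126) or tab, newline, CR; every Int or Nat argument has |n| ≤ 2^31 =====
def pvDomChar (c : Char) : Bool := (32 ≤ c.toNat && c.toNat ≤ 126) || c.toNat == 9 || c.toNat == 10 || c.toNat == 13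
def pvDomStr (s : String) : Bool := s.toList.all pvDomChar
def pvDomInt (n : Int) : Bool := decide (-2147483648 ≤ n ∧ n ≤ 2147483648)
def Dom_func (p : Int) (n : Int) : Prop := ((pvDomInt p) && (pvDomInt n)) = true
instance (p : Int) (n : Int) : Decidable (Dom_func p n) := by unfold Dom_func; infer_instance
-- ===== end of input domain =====

-- B replaces A's closed-form index arithmetic + recursive to_base string construction by a block walk
-- maintaining (k, p^(k-1), remaining) and a purely arithmetical digit extraction (alternative algorithm).


-- ===== PORT A =====
-- convert_string
def pvConvert : List Char := "0123456789ABCDEF".toList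

-- convert_string[i] (one-character string, as a char list; [] where Python raises IndexError — outside Pre_)
def pvCharA (i : Int) : List Char :=
  match PySem.List.pyGet? pvConvert i with
  | some c => [c]
  | none => []

-- to_base(n, base), fuel only as totality guard for the Python recursion (Python diverges for base ≤ 1;
-- inside Pre_ the fuel passed is always sufficient, proved below)
def pvToBase (base : Int) : Nat → Int → List Char
  | 0, _ => []
  | f + 1, n =>
    if n < base then pvCharA n
    else pvToBase base f (PySem.Int.floordiv n base) ++ pvCharA (PySem.Int.mod n base)

-- amount(p, digit_count)
def pvAmount (p d : Int) : Int := (p - 1) * p ^ (d - 1).toNat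

-- the while True loop of func, state (digit_count, digit_sum); fuel is a totality guard only
def pvLoopA (p n : Int) : Nat → Int → Int → Int × Int
  | 0, d, s => (d, s)
  | f + 1, d, s =>
    let cur := pvAmount p d * d
    if s + cur ≥ n then (d, s) else pvLoopA p n f (d + 1) (s + cur)

def func (p : Int) (n : Int) : String :=
  let st := pvLoopA p n (n.toNat + 1) 1 0
  let digitCount := st.1
  let digitSum := st.2
  let numsBefore := PySem.Int.floordiv (n - digitSum - 1) digitCount
  match PySem.Int.ofCharsBase? ('1' :: List.replicate (digitCount - 1).toNat '0') p with
  | none => ""      -- int('10…0', p) raises ValueError; outside Pre_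
  | some first10 =>
    let numSearch := pvToBase p (n.toNat + 1) (first10 + numsBefore)
    let digitIndex := n - digitSum - numsBefore * digitCount - 1
    match PySem.List.pyGet? numSearch digitIndex with
    | some c => String.ofList [c]
    | none => ""    -- IndexError; outside Pre_

-- ===== PORT B =====
def pvDigits : List Char := "0123456789ABCDEF".toList

-- the while loop of B, state (k, start, rem); fuel is a totality guard only
def pvLoopB (p : Int) : Nat → Int → Int → Int → Int × Int × Int
  | 0, k, start, rem => (k, start, rem)
  | f + 1, k, start, rem =>
    if rem > start * (p - 1) * k then pvLoopB p f (k + 1) (start * p) (rem - start * (p - 1) * k)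
    else (k, start, rem)

def func_alt (p : Int) (n : Int) : String :=
  let st := pvLoopB p (n.toNat + 1) 1 1 n
  let k := st.1
  let start := st.2.1
  let rem := st.2.2
  let q := PySem.Int.floordiv (rem - 1) k
  let r := PySem.Int.mod (rem - 1) k
  let num := start + q
  let shift := k - 1 - r     -- inside Pre_ always ≥ 0; .toNat is exact there
  match PySem.List.pyGet? pvDigits (PySem.Int.mod (PySem.Int.floordiv num (p ^ shift.toNat)) p) with
  | some c => String.ofList [c]
  | none => ""    -- IndexError; outside Pre_

-- ===== PRECONDITION & SPEC =====
-- Pre_ restricts to the natural domain of the function: bases the 16-character digit table supports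
-- (p > 16 raises IndexError as soon as a digit ≥ 16 occurs, p > 36 and p < 2 raise in int(); the few
-- returning inputs outside 2..16 are accidental) and n ≥ -16 (for n ≤ -17 A raises IndexError).
def Pre_func (p : Int) (n : Int) : Prop := 2 ≤ p ∧ p ≤ 16 ∧ -16 ≤ n
instance (p : Int) (n : Int) : Decidable (Pre_func p n) := by unfold Pre_func; infer_instance
def pvWitness_func : Int × Int := (10, 5)

-- On -16 ≤ n ≤ -1 (positions before the stream starts) A returns a digit picked by Python's
-- negative-string-index wraparound ('F' at n = -1); B returns what its arithmetic yields there
-- ('9' at (10, -1)); no such position exists, and B's value is not an indexing accident.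
def D_func (p : Int) (n : Int) : Prop := -16 ≤ n ∧ n ≤ -1
instance (p : Int) (n : Int) : Decidable (D_func p n) := by unfold D_func; infer_instance

def Spec_func (p : Int) (n : Int) (out : String) : Prop := ¬ D_func p n → out = func_alt p n
instance (p : Int) (n : Int) (out : String) : Decidable (Spec_func p n out) := by unfold Spec_func; infer_instance

def pvDiffWitness_func : Int × Int := (10, -1)
def pvDiffWitnessOut_func : String × String := ("F", "9")

-- ===== CLAIM (what is proved, stated in full; the proofs are below) =====
def Claim_unchanged_func : Prop := ∀ (p : Int) (n : Int), Dom_func p n → Pre_func p n → Spec_func p n (func p n)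
def Claim_changed_func : Prop := Dom_func (pvDiffWitness_func.1) (pvDiffWitness_func.2) ∧ Pre_func (pvDiffWitness_func.1) (pvDiffWitness_func.2) ∧ D_func (pvDiffWitness_func.1) (pvDiffWitness_func.2) ∧ func (pvDiffWitness_func.1) (pvDiffWitness_func.2) = pvDiffWitnessOut_func.1 ∧ func_alt (pvDiffWitness_func.1) (pvDiffWitness_func.2) = pvDiffWitnessOut_func.2 ∧ pvDiffWitnessOut_func.1 ≠ pvDiffWitnessOut_func.2

-- ===== LEMMAS AND PROOFS =====

-- The two loops run in lockstep: B's state is (k, p^(k-1), n - digit_sum).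
theorem pv_loop_rel (p n : Int) (fuel : Nat) :
    ∀ (k ds : Int), 1 ≤ k →
      pvLoopB p fuel k (p ^ (k - 1).toNat) (n - ds) =
        ((pvLoopA p n fuel k ds).1, p ^ ((pvLoopA p n fuel k ds).1 - 1).toNat,
          n - (pvLoopA p n fuel k ds).2) := by
  induction fuel with
  | zero => intro k ds _; simp [pvLoopA, pvLoopB]
  | succ f ih =>
    intro k ds hk
    have hcur : p ^ (k - 1).toNat * (p - 1) * k = pvAmount p k * k := by
      unfold pvAmount; ring
    by_cases h : (n - ds) > p ^ (k - 1).toNat * (p - 1) * k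
    · have hA : ¬ (ds + pvAmount p k * k ≥ n) := by rw [← hcur] at *; omega
      have hpow : p ^ (k - 1).toNat * p = p ^ (k + 1 - 1).toNat := by
        rw [← pow_succ]
        congr 1
        omega
      simp only [pvLoopA, pvLoopB, if_pos h, if_neg hA]
      have := ih (k + 1) (ds + pvAmount p k * k) (by omega)
      rw [hpow, show n - ds - p ^ (k - 1).toNat * (p - 1) * k = n - (ds + pvAmount p k * k) by
        rw [← hcur]; ring] at *
      exact this
    · have hA : ds + pvAmount p k * k ≥ n := by rw [← hcur] at *; omega
      simp only [pvLoopA, pvLoopB, if_neg h, if_pos hA]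

-- Invariants of B's loop, with the exit condition guaranteed by fuel ≥ rem.
theorem pv_loopB_post (p n : Int) (fuel : Nat) :
    ∀ (k start rem : Int), 2 ≤ p → 1 ≤ k → 1 ≤ start → 1 ≤ rem → rem ≤ (fuel : Int) →
      rem ≤ n → start ≤ n * p →
      1 ≤ (pvLoopB p fuel k start rem).1 ∧
      1 ≤ (pvLoopB p fuel k start rem).2.1 ∧
      1 ≤ (pvLoopB p fuel k start rem).2.2 ∧
      (pvLoopB p fuel k start rem).2.2 ≤
        (pvLoopB p fuel k start rem).2.1 * (p - 1) * (pvLoopB p fuel k start rem).1 ∧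
      (pvLoopB p fuel k start rem).1 - k ≤ rem - (pvLoopB p fuel k start rem).2.2 ∧
      (pvLoopB p fuel k start rem).2.1 ≤ n * p := by
  induction fuel with
  | zero => intro k start rem _ _ _ h1 h2 _ _; exfalso; simp at h2; omega
  | succ f ih =>
    intro k start rem hp hk hs hr hfuel hrn hsn
    have hpk : 1 ≤ (p - 1) * k := by
      have := mul_le_mul (show (1:Int) ≤ p - 1 by omega) hk zero_le_one (by omega)
      simpa using this
    have hcur1 : 1 ≤ start * (p - 1) * k := by
      rw [mul_assoc]
      have := mul_le_mul hs hpk zero_le_one (by omega)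
      simpa using this
    by_cases h : rem > start * (p - 1) * k
    · simp only [pvLoopB, if_pos h]
      have hs' : start ≤ start * (p - 1) * k := by
        rw [mul_assoc]
        calc start = start * 1 := by ring
          _ ≤ start * ((p - 1) * k) := mul_le_mul_of_nonneg_left hpk (by omega)
      have hstart' : start * p ≤ n * p := by
        have : start ≤ n := by omega
        nlinarith
      have := ih (k + 1) (start * p) (rem - start * (p - 1) * k) hp (by omega)
        (by nlinarith) (by omega) (by push_cast at hfuel ⊢; omega) (by omega) hstart'
      refine ⟨this.1, this.2.1, this.2.2.1, this.2.2.2.1, by omega, this.2.2.2.2.2⟩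
    · simp only [pvLoopB, if_neg h]
      exact ⟨hk, hs, hr, by omega, by omega, hsn⟩

-- int('1' + '0'*m, q) = q^m for the bases and lengths reachable inside Pre_ (checked exhaustively).
theorem pv_parse : ∀ q : Nat, q < 17 → 2 ≤ q → ∀ m : Nat, m < 36 →
    PySem.Int.ofCharsBase? ('1' :: List.replicate m '0') (q : Int) = some ((q : Int) ^ m) := by
  decide

theorem pv_charA : ∀ v : Nat, v < 16 → pvCharA (v : Int) = [pvConvert.getD v ' '] := by
  decide

theorem pv_digitsB : ∀ v : Nat, v < 16 →
    PySem.List.pyGet? pvDigits (v : Int) = some (pvConvert.getD v ' ') := by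
  decide

-- to_base produces exactly the m base-q digits of N, most significant first.
theorem pv_toBase_eq (q : Nat) (hq2 : 2 ≤ q) (hq : q ≤ 16) :
    ∀ (m : Nat), 1 ≤ m → ∀ (fuel : Nat) (N : Nat), m ≤ fuel →
      q ^ (m - 1) ≤ N → N < q ^ m →
      pvToBase (q : Int) fuel (N : Int) =
        (List.range m).map (fun i => pvConvert.getD ((N / q ^ (m - 1 - i)) % q) ' ') := by
  intro m
  induction m with
  | zero => omega
  | succ m' ihm =>
    intro _ fuel N hfuel hlo hhi
    obtain ⟨f, rfl⟩ : ∃ f, fuel = f + 1 := ⟨fuel - 1, by omega⟩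
    rcases Nat.eq_zero_or_pos m' with hm0 | hm1
    · subst hm0
      have hNq : N < q := by simpa using hhi
      have hlt : (N : Int) < (q : Int) := by exact_mod_cast hNq
      simp only [pvToBase, if_pos hlt]
      rw [pv_charA N (by omega)]
      simp [Nat.mod_eq_of_lt hNq]
    · have hqN : q ≤ N := by
        calc q = q ^ 1 := (pow_one q).symm
          _ ≤ q ^ m' := Nat.pow_le_pow_right (by omega) (by omega)
          _ ≤ N := by simpa using hlo
      have hnlt : ¬ ((N : Int) < (q : Int)) := not_lt.mpr (by exact_mod_cast hqN)
      simp only [pvToBase, if_neg hnlt]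
      have hdiv : PySem.Int.floordiv (N : Int) (q : Int) = ((N / q : Nat) : Int) :=
        PySem.Int.floordiv_natCast N q
      have hmod : PySem.Int.mod (N : Int) (q : Int) = ((N % q : Nat) : Int) :=
        PySem.Int.mod_natCast N q
      rw [hdiv, hmod, pv_charA (N % q) (lt_of_lt_of_le (Nat.mod_lt _ (by omega)) hq)]
      have hq0 : 0 < q := by omega
      have hlo' : q ^ (m' - 1) ≤ N / q := by
        rw [Nat.le_div_iff_mul_le hq0]
        calc q ^ (m' - 1) * q = q ^ (m' - 1 + 1) := (pow_succ q (m' - 1)).symm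
          _ = q ^ m' := by congr 1; omega
          _ ≤ N := by simpa using hlo
      have hhi' : N / q < q ^ m' := by
        rw [Nat.div_lt_iff_lt_mul hq0]
        calc N < q ^ (m' + 1) := hhi
          _ = q ^ m' * q := pow_succ q m'
      rw [ihm hm1 f (N / q) (by omega) hlo' hhi']
      rw [List.range_succ, List.map_append]
      congr 1
      · apply List.map_congr_left
        intro i hi
        have him : i < m' := List.mem_range.mp hi
        have hpow : q * q ^ (m' - 1 - i) = q ^ (m' + 1 - 1 - i) := by
          rw [← pow_succ']
          congr 1
          omega
        simp only [Nat.div_div_eq_div_mul, hpow]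
      · simp

-- ===== VERDICT (by name: the statement is the Claim_ definition above) =====
theorem func_spec : Claim_unchanged_func := by
  unfold Claim_unchanged_func
  intro p n hdom hpre hnD
  obtain ⟨hp2, hp16, hnm⟩ := hpre
  have hn0 : 0 ≤ n := by unfold D_func at hnD; omega
  rcases eq_or_lt_of_le hn0 with hz | hpos
  · -- n = 0: both programs print '0'; p ranges over 2..16, check each case
    subst hz
    interval_cases p <;> decide
  · have hn1 : 1 ≤ n := hpos
    have hdom' : n ≤ 2147483648 := by
      unfold Dom_func pvDomInt at hdom
      simp at hdom
      omega
    unfold func func_alt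
    have hrel := pv_loop_rel p n (n.toNat + 1) 1 0 le_rfl
    simp only [show ((1:Int) - 1).toNat = 0 from rfl, pow_zero, sub_zero] at hrel
    set K := (pvLoopA p n (n.toNat + 1) 1 0).1 with hKdef
    set DS := (pvLoopA p n (n.toNat + 1) 1 0).2 with hDSdef
    have hpost := pv_loopB_post p n (n.toNat + 1) 1 1 n hp2 le_rfl le_rfl hn1
      (by push_cast; omega) le_rfl (by nlinarith)
    rw [hrel] at hpost
    simp only at hpost
    obtain ⟨hK1, hS1, hR1, hRmax, hKbd, hSbd⟩ := hpost
    rw [hrel]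
    simp only
    set M := (K - 1).toNat with hMdef
    have hKM : (M : Int) = K - 1 := Int.toNat_of_nonneg (by omega)
    set R := n - DS with hRdef
    set q' := PySem.Int.floordiv (R - 1) K with hq'def
    set r := PySem.Int.mod (R - 1) K with hrdef
    have hq'0 : 0 ≤ q' := by
      rw [hq'def, PySem.Int.floordiv_eq_ediv_of_pos (by omega)]
      exact Int.ediv_nonneg (by omega) (by omega)
    have hq'lt : q' < (p - 1) * p ^ M := by
      rw [hq'def, PySem.Int.floordiv_lt_iff_lt_mul (by omega)]
      have hcomm : (p - 1) * p ^ M * K = p ^ M * (p - 1) * K := by ring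
      omega
    have hsum : q' * K + r = R - 1 := PySem.Int.floordiv_mul_add_mod (R - 1) K
    have hr0 : 0 ≤ r := PySem.Int.mod_nonneg (R - 1) (by omega)
    have hrK : r < K := PySem.Int.mod_lt (R - 1) (by omega)
    -- the number to print, as a natural
    set p' := p.toNat with hp'def
    have hp : (p' : Int) = p := Int.toNat_of_nonneg (by omega)
    have hpowM : ((p' ^ M : Nat) : Int) = p ^ M := by push_cast [hp]; rfl
    have hpowM1 : ((p' ^ (M + 1) : Nat) : Int) = p ^ M * p := by push_cast [hp]; ring
    set NN := (p ^ M + q').toNat with hNNdef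
    have hNN : (NN : Int) = p ^ M + q' := Int.toNat_of_nonneg (by positivity)
    have hNlo : p' ^ M ≤ NN := by omega
    have hNhi : NN < p' ^ (M + 1) := by
      have hmul : p ^ M * 1 ≤ p ^ M * (p - 1) :=
        mul_le_mul_of_nonneg_left (by omega) (by positivity)
      have e1 : (p - 1) * p ^ M = p ^ M * (p - 1) := by ring
      have e2 : p ^ M * p = p ^ M * (p - 1) + p ^ M * 1 := by ring
      omega
    -- bound on M (from Dom): p^M ≤ n*p ≤ 2^35
    have hM36 : M < 36 := by
      by_contra h36
      have h1 : (2 : Int) ^ 36 ≤ 2 ^ M := pow_le_pow_right₀ one_le_two (by omega)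
      have h2 : (2 : Int) ^ M ≤ p ^ M := pow_le_pow_left₀ (by norm_num) hp2 M
      have h3 : n * p ≤ 2147483648 * 16 := by nlinarith
      norm_num at h1 h2 h3
      omega
    have hMn : M + 1 ≤ n.toNat + 1 := by omega
    -- A side: the parsed '1' '0'*M literal is p^M
    have hparse := pv_parse p' (by omega) (by omega) M hM36
    rw [hp] at hparse
    rw [hparse]
    simp only
    -- A side: to_base gives the digit list of NN
    have htb := pv_toBase_eq p' (by omega) (by omega) (M + 1) (by omega) (n.toNat + 1) NN hMn hNlo hNhi
    rw [hp, hNN] at htb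
    rw [htb]
    -- A side: the index is r
    have hidx : R - q' * (pvLoopA p n (n.toNat + 1) 1 0).1 - 1 = r := by
      rw [← hKdef]
      omega
    rw [hidx]
    -- index the digit list at r
    have hrnat : ((r.toNat : Nat) : Int) = r := Int.toNat_of_nonneg hr0
    have hrM : r.toNat < M + 1 := by omega
    rw [← hrnat, PySem.List.pyGet?_natCast]
    rw [List.getElem?_map, List.getElem?_range hrM]
    simp only [Option.map_some]
    -- B side: the arithmetic digit is the same character
    have hshift : (K - 1 - (r.toNat : Int)).toNat = M - r.toNat := by omega
    have hpowS : p ^ (M - r.toNat) = ((p' ^ (M - r.toNat) : Nat) : Int) := by push_cast [hp]; rfl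
    rw [hshift, show p ^ M + q' = (NN : Int) from hNN.symm, hpowS,
      PySem.Int.floordiv_natCast, ← hp, PySem.Int.mod_natCast]
    rw [pv_digitsB (NN / p' ^ (M - r.toNat) % p') (by
      have := Nat.mod_lt (NN / p' ^ (M - r.toNat)) (show 0 < p' by omega)
      omega)]
    simp

theorem func_changed : Claim_changed_func := by
  unfold Claim_changed_func
  decide
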